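-- pv_equiv track=rewrite | github.com/BegzodMurodullayev/artificial_teacher | bot/bot.py | parse_pronunciation_target
-- ===== SOURCE A (Python) =====
-- def parse_pronunciation_target(content: str, default_accent: str = "us") -> tuple[str, str]:
--     raw = (content or "").strip()
--     low = raw.lower()
--     prefixes = (
--         ("uk:", "uk"),
--         ("us:", "us"),
--         ("british:", "uk"),
--         ("american:", "us"),
--         ("uk ", "uk"),
--         ("us ", "us"),
--     )
--     for prefix, accent in prefixes:
--         if low.startswith(prefix):
--             return accent, raw[len(prefix):].strip()
--     return default_accent, raw
-- ===== SOURCE B (Python) =====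
-- def parse_pronunciation_target(content: str, default_accent: str = "us") -> tuple[str, str]:
--     colon_map = {"uk": "uk", "us": "us", "british": "uk", "american": "us"}
--     space_map = {"uk": "uk", "us": "us"}
--     raw = (content or "").strip()
--     head, sep, rest = raw.partition(":")
--     if sep:
--         accent = colon_map.get(head.lower())
--         if accent is not None:
--             return accent, rest.strip()
--     head, sep, rest = raw.partition(" ")
--     if sep:
--         accent = space_map.get(head.lower())
--         if accent is not None:
--             return accent, rest.strip()
--     return default_accent, raw
-- ===== Notes on version B (the rewrite author's own statement) =====
-- stated objective: idiomatic
-- what changed: A scans an ordered 6-tuple of accent prefixes with startswith; B instead partitions the string at its first colon (then at its first space) and looks the lowercased head up in a colon/space accent dict.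
import Mathlib
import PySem

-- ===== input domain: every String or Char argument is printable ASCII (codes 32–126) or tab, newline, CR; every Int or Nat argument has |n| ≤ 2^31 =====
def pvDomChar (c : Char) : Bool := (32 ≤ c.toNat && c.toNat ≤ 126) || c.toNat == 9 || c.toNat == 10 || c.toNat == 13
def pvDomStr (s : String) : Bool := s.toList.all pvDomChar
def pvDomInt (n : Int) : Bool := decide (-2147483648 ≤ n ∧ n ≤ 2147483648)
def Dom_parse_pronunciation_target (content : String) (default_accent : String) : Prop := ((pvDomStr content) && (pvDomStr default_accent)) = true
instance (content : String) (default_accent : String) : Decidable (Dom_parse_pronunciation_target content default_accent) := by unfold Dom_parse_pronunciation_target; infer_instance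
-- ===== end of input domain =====

-- B replaces A's ordered prefix scan by delimiter detection: partition on the first ':' (then on the
-- first ' ') and look the lowercased head up in an accent map (objective: idiomatic / alternative).

-- ===== PORT A =====
-- the tuple of (prefix, accent) pairs A iterates over
def pptPrefixes : List (List Char × String) :=
  [(['u','k',':'], "uk"), (['u','s',':'], "us"),
   (['b','r','i','t','i','s','h',':'], "uk"), (['a','m','e','r','i','c','a','n',':'], "us"),
   (['u','k',' '], "uk"), (['u','s',' '], "us")]

-- A's for-loop over the prefixes: first matching prefix returns (accent, raw[len(prefix):].strip())
def pptLoop (raw low : List Char) : List (List Char × String) → Option (String × String)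
  | [] => none
  | (p, accent) :: rest =>
    if PySem.Chars.startswith low p then
      some (accent, String.ofList (PySem.Chars.strip (PySem.List.slice raw (some (p.length : Int)) none)))
    else pptLoop raw low rest

def parse_pronunciation_target (content : String) (default_accent : String) : String × String :=
  let raw := PySem.Chars.strip content.toList   -- (content or "").strip(): 'or ""' is the identity on str here
  let low := PySem.Chars.lower raw
  match pptLoop raw low pptPrefixes with
  | some r => r
  | none => (default_accent, String.ofList raw)

-- ===== PORT B =====
-- the two accent dicts of Source B, as association lists (first-match lookup = dict.get)
def pptColonMap : List (List Char × String) :=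
  [(['u','k'], "uk"), (['u','s'], "us"),
   (['b','r','i','t','i','s','h'], "uk"), (['a','m','e','r','i','c','a','n'], "us")]
def pptSpaceMap : List (List Char × String) :=
  [(['u','k'], "uk"), (['u','s'], "us")]

-- raw.partition(sep) for a one-character separator, ported by hand (exact: head = text before the
-- first occurrence of sep; Bool = separator found; rest = text after it, or [] when not found)
def pptPartition (raw : List Char) (sep : Char) : List Char × Bool × List Char :=
  let head := raw.takeWhile (fun c => c != sep)
  if head.length < raw.length then (head, true, raw.drop (head.length + 1))
  else (raw, false, [])

-- Source B's second block: partition on ' ' and look the lowercased head up in space_map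
def pptSpaceBranch (raw : List Char) (default_accent : String) : String × String :=
  match pptPartition raw ' ' with
  | (head, sep, rest) =>
    if sep then
      match pptSpaceMap.lookup (PySem.Chars.lower head) with
      | some accent => (accent, String.ofList (PySem.Chars.strip rest))
      | none => (default_accent, String.ofList raw)
    else (default_accent, String.ofList raw)

-- Source B's first block: partition on ':' and look the lowercased head up in colon_map
def pptColonBranch (raw : List Char) (default_accent : String) : String × String :=
  match pptPartition raw ':' with
  | (head, sep, rest) =>
    if sep then
      match pptColonMap.lookup (PySem.Chars.lower head) with
      | some accent => (accent, String.ofList (PySem.Chars.strip rest))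
      | none => pptSpaceBranch raw default_accent
    else pptSpaceBranch raw default_accent

def parse_pronunciation_target_alt (content : String) (default_accent : String) : String × String :=
  let raw := PySem.Chars.strip content.toList
  pptColonBranch raw default_accent

-- ===== PRECONDITION & SPEC =====
def Spec_parse_pronunciation_target (content : String) (default_accent : String) (out : String × String) : Prop := out = parse_pronunciation_target_alt content default_accent
instance (content : String) (default_accent : String) (out : String × String) : Decidable (Spec_parse_pronunciation_target content default_accent out) := by unfold Spec_parse_pronunciation_target; infer_instance

-- ===== CLAIM (what is proved, stated in full; the proofs are below) =====
def Claim_equal_parse_pronunciation_target : Prop := ∀ (content : String) (default_accent : String), Dom_parse_pronunciation_target content default_accent → Spec_parse_pronunciation_target content default_accent (parse_pronunciation_target content default_accent)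

-- ===== LEMMAS AND PROOFS =====

-- lowering a character yields a non-lowercase-letter only if the character was already that symbol
theorem ppt_lowerChar_eq_nonletter {c sep : Char} (hs : sep.toNat < 97 ∨ 122 < sep.toNat)
    (h : PySem.Chars.lowerChar c = sep) : c = sep := by
  unfold PySem.Chars.lowerChar PySem.Chars.isupper at h
  split at h
  · rename_i hr
    simp only [Bool.and_eq_true, decide_eq_true_eq, Char.le_def, UInt32.le_iff_toNat_le] at hr
    have eA : 'A'.val.toNat = 65 := by decide
    have eZ : 'Z'.val.toNat = 90 := by decide
    have hc : c.toNat = c.val.toNat := rfl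
    have h3 := congrArg Char.toNat h
    rw [Char.toNat_ofNat] at h3
    rw [if_pos (by left; change c.toNat + 32 < 55296; omega)] at h3
    exfalso; omega
  · exact h

-- the partition head matches a lowercase key k exactly when lower(raw) starts with "k<sep>"
theorem ppt_key_iff (raw k : List Char) (sep : Char)
    (hs : sep.toNat < 97 ∨ 122 < sep.toNat)
    (hsl : PySem.Chars.lowerChar sep = sep)
    (hk : sep ∉ k) :
    ((raw.takeWhile (fun c => c != sep)).length < raw.length ∧
      PySem.Chars.lower (raw.takeWhile (fun c => c != sep)) = k)
    ↔ (k ++ [sep]) <+: PySem.Chars.lower raw := by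
  constructor
  · rintro ⟨hlen, hlow⟩
    have hd : raw.dropWhile (fun c => c != sep) ≠ [] := by
      intro he
      have h0 := List.takeWhile_append_dropWhile (p := fun c => c != sep) (l := raw)
      rw [he, List.append_nil] at h0
      rw [h0] at hlen; omega
    obtain ⟨a, tl, ht⟩ : ∃ a l, raw.dropWhile (fun c => c != sep) = a :: l := by
      cases h : raw.dropWhile (fun c => c != sep) with
      | nil => exact absurd h hd
      | cons a l => exact ⟨a, l, rfl⟩
    have hh : (a != sep) = false := by
      have := List.head_dropWhile_not (fun c => c != sep) hd
      simpa [ht] using this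
    simp only [bne_eq_false_iff_eq] at hh
    have hraw : raw = raw.takeWhile (fun c => c != sep) ++ a :: tl := by
      conv_lhs => rw [← List.takeWhile_append_dropWhile (p := fun c => c != sep) (l := raw)]
      rw [ht]
    rw [hh] at hraw
    rw [hraw]
    refine ⟨PySem.Chars.lower tl, ?_⟩
    simp only [PySem.Chars.lower, List.map_append, List.map_cons, hsl]
    rw [show List.map PySem.Chars.lowerChar (List.takeWhile (fun c => c != sep) raw) = k from hlow]
    simp
  · intro hpre
    obtain ⟨t2, hcat⟩ := hpre
    have hmap : List.map PySem.Chars.lowerChar raw = k ++ sep :: t2 := by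
      simpa [PySem.Chars.lower] using hcat.symm
    rw [List.map_eq_append_iff] at hmap
    obtain ⟨r1, r2, hsplit, hm1, hm2⟩ := hmap
    rw [List.map_eq_cons_iff] at hm2
    obtain ⟨c, r3, hr2, hcl, hm3⟩ := hm2
    have hcsep : c = sep := ppt_lowerChar_eq_nonletter hs hcl
    rw [hcsep] at hr2
    rw [hr2] at hsplit
    have hall : ∀ x ∈ r1, (x != sep) = true := by
      intro x hx
      rcases eq_or_ne x sep with rfl | hne
      · exfalso
        apply hk
        rw [← hm1]
        have hmem : PySem.Chars.lowerChar x ∈ List.map PySem.Chars.lowerChar r1 :=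
          List.mem_map_of_mem hx
        rwa [hsl] at hmem
      · simpa using hne
    have hself : r1.takeWhile (fun c => c != sep) = r1 := List.takeWhile_eq_self_iff.mpr hall
    have htw : raw.takeWhile (fun c => c != sep) = r1 := by
      rw [hsplit, List.takeWhile_append, if_pos (by rw [hself])]
      simp
    refine ⟨?_, ?_⟩
    · rw [htw, hsplit]; simp
    · rw [htw]; simpa [PySem.Chars.lower] using hm1

-- lower preserves length
theorem ppt_len_of_lower {h k : List Char} (hl : PySem.Chars.lower h = k) : h.length = k.length := by
  have := congrArg List.length hl
  simpa [PySem.Chars.lower] using this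


-- if none of the four colon keys starts lower(raw), Source B's colon block falls through
theorem ppt_colon_fail (raw : List Char) (d : String)
    (h1 : ¬ (['u','k'] ++ [':'] <+: PySem.Chars.lower raw))
    (h2 : ¬ (['u','s'] ++ [':'] <+: PySem.Chars.lower raw))
    (h3 : ¬ (['b','r','i','t','i','s','h'] ++ [':'] <+: PySem.Chars.lower raw))
    (h4 : ¬ (['a','m','e','r','i','c','a','n'] ++ [':'] <+: PySem.Chars.lower raw)) :
    pptColonBranch raw d = pptSpaceBranch raw d := by
  by_cases hc : (raw.takeWhile (fun c => c != ':')).length < raw.length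
  · have n1 : PySem.Chars.lower (raw.takeWhile (fun c => c != ':')) ≠ ['u','k'] :=
      fun he => h1 ((ppt_key_iff raw ['u','k'] ':' (by decide) (by decide) (by decide)).mp ⟨hc, he⟩)
    have n2 : PySem.Chars.lower (raw.takeWhile (fun c => c != ':')) ≠ ['u','s'] :=
      fun he => h2 ((ppt_key_iff raw ['u','s'] ':' (by decide) (by decide) (by decide)).mp ⟨hc, he⟩)
    have n3 : PySem.Chars.lower (raw.takeWhile (fun c => c != ':')) ≠ ['b','r','i','t','i','s','h'] :=
      fun he => h3 ((ppt_key_iff raw ['b','r','i','t','i','s','h'] ':' (by decide) (by decide) (by decide)).mp ⟨hc, he⟩)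
    have n4 : PySem.Chars.lower (raw.takeWhile (fun c => c != ':')) ≠ ['a','m','e','r','i','c','a','n'] :=
      fun he => h4 ((ppt_key_iff raw ['a','m','e','r','i','c','a','n'] ':' (by decide) (by decide) (by decide)).mp ⟨hc, he⟩)
    simp [pptColonBranch, pptPartition, if_pos hc, pptColonMap, List.lookup,
      beq_eq_false_iff_ne.mpr n1, beq_eq_false_iff_ne.mpr n2,
      beq_eq_false_iff_ne.mpr n3, beq_eq_false_iff_ne.mpr n4]
  · simp [pptColonBranch, pptPartition, if_neg hc]

-- if neither space key starts lower(raw), Source B's space block returns the default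
theorem ppt_space_fail (raw : List Char) (d : String)
    (h5 : ¬ (['u','k'] ++ [' '] <+: PySem.Chars.lower raw))
    (h6 : ¬ (['u','s'] ++ [' '] <+: PySem.Chars.lower raw)) :
    pptSpaceBranch raw d = (d, String.ofList raw) := by
  by_cases hc : (raw.takeWhile (fun c => c != ' ')).length < raw.length
  · have n5 : PySem.Chars.lower (raw.takeWhile (fun c => c != ' ')) ≠ ['u','k'] :=
      fun he => h5 ((ppt_key_iff raw ['u','k'] ' ' (by decide) (by decide) (by decide)).mp ⟨hc, he⟩)
    have n6 : PySem.Chars.lower (raw.takeWhile (fun c => c != ' ')) ≠ ['u','s'] :=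
      fun he => h6 ((ppt_key_iff raw ['u','s'] ' ' (by decide) (by decide) (by decide)).mp ⟨hc, he⟩)
    simp [pptSpaceBranch, pptPartition, if_pos hc, pptSpaceMap, List.lookup,
      beq_eq_false_iff_ne.mpr n5, beq_eq_false_iff_ne.mpr n6]
  · simp [pptSpaceBranch, pptPartition, if_neg hc]

-- Source B's colon block on a matched key
theorem ppt_colon_hit (raw : List Char) (d : String) (k : List Char) (accent : String)
    (hkc : ':' ∉ k)
    (hlk : pptColonMap.lookup k = some accent)
    (h : (k ++ [':']) <+: PySem.Chars.lower raw) :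
    pptColonBranch raw d = (accent, String.ofList (PySem.Chars.strip (raw.drop (k.length + 1)))) := by
  obtain ⟨hlen, hlow⟩ := (ppt_key_iff raw k ':' (by decide) (by decide) hkc).mpr h
  have hklen := ppt_len_of_lower hlow
  have hlen' : k.length < raw.length := hklen ▸ hlen
  simp [pptColonBranch, pptPartition, hklen, hlen', hlow, hlk]

-- Source B's space block on a matched key
theorem ppt_space_hit (raw : List Char) (d : String) (k : List Char) (accent : String)
    (hkc : ' ' ∉ k)
    (hlk : pptSpaceMap.lookup k = some accent)
    (h : (k ++ [' ']) <+: PySem.Chars.lower raw) :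
    pptSpaceBranch raw d = (accent, String.ofList (PySem.Chars.strip (raw.drop (k.length + 1)))) := by
  obtain ⟨hlen, hlow⟩ := (ppt_key_iff raw k ' ' (by decide) (by decide) hkc).mpr h
  have hklen := ppt_len_of_lower hlow
  have hlen' : k.length < raw.length := hklen ▸ hlen
  simp [pptSpaceBranch, pptPartition, hklen, hlen', hlow, hlk]

-- the heart of the claim: A's prefix chain and B's two partition blocks agree on any raw
theorem ppt_core (raw : List Char) (d : String) :
    (match pptLoop raw (PySem.Chars.lower raw) pptPrefixes with
      | some r => r
      | none => (d, String.ofList raw)) = pptColonBranch raw d := by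
  have sw := fun (p : List Char) => PySem.Chars.startswith_iff (PySem.Chars.lower raw) p
  by_cases h1 : ['u','k',':'] <+: PySem.Chars.lower raw
  · rw [ppt_colon_hit raw d ['u','k'] "uk" (by decide) (by decide) h1]
    have e1 : PySem.Chars.startswith (PySem.Chars.lower raw) ['u','k',':'] = true := (sw _).mpr h1
    simp [pptLoop, pptPrefixes, e1, PySem.List.slice_from raw (by norm_num : (0:Int) ≤ 3)]
  have e1 : PySem.Chars.startswith (PySem.Chars.lower raw) ['u','k',':'] = false :=
    Bool.eq_false_iff.mpr (fun h => h1 ((sw _).mp h))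
  by_cases h2 : ['u','s',':'] <+: PySem.Chars.lower raw
  · rw [ppt_colon_hit raw d ['u','s'] "us" (by decide) (by decide) h2]
    have e2 : PySem.Chars.startswith (PySem.Chars.lower raw) ['u','s',':'] = true := (sw _).mpr h2
    simp [pptLoop, pptPrefixes, e1, e2, PySem.List.slice_from raw (by norm_num : (0:Int) ≤ 3)]
  have e2 : PySem.Chars.startswith (PySem.Chars.lower raw) ['u','s',':'] = false :=
    Bool.eq_false_iff.mpr (fun h => h2 ((sw _).mp h))
  by_cases h3 : ['b','r','i','t','i','s','h',':'] <+: PySem.Chars.lower raw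
  · rw [ppt_colon_hit raw d ['b','r','i','t','i','s','h'] "uk" (by decide) (by decide) h3]
    have e3 : PySem.Chars.startswith (PySem.Chars.lower raw) ['b','r','i','t','i','s','h',':'] = true := (sw _).mpr h3
    simp [pptLoop, pptPrefixes, e1, e2, e3, PySem.List.slice_from raw (by norm_num : (0:Int) ≤ 8)]
  have e3 : PySem.Chars.startswith (PySem.Chars.lower raw) ['b','r','i','t','i','s','h',':'] = false :=
    Bool.eq_false_iff.mpr (fun h => h3 ((sw _).mp h))
  by_cases h4 : ['a','m','e','r','i','c','a','n',':'] <+: PySem.Chars.lower raw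
  · rw [ppt_colon_hit raw d ['a','m','e','r','i','c','a','n'] "us" (by decide) (by decide) h4]
    have e4 : PySem.Chars.startswith (PySem.Chars.lower raw) ['a','m','e','r','i','c','a','n',':'] = true := (sw _).mpr h4
    simp [pptLoop, pptPrefixes, e1, e2, e3, e4, PySem.List.slice_from raw (by norm_num : (0:Int) ≤ 9)]
  have e4 : PySem.Chars.startswith (PySem.Chars.lower raw) ['a','m','e','r','i','c','a','n',':'] = false :=
    Bool.eq_false_iff.mpr (fun h => h4 ((sw _).mp h))
  rw [ppt_colon_fail raw d h1 h2 h3 h4]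
  by_cases h5 : ['u','k',' '] <+: PySem.Chars.lower raw
  · rw [ppt_space_hit raw d ['u','k'] "uk" (by decide) (by decide) h5]
    have e5 : PySem.Chars.startswith (PySem.Chars.lower raw) ['u','k',' '] = true := (sw _).mpr h5
    simp [pptLoop, pptPrefixes, e1, e2, e3, e4, e5, PySem.List.slice_from raw (by norm_num : (0:Int) ≤ 3)]
  have e5 : PySem.Chars.startswith (PySem.Chars.lower raw) ['u','k',' '] = false :=
    Bool.eq_false_iff.mpr (fun h => h5 ((sw _).mp h))
  by_cases h6 : ['u','s',' '] <+: PySem.Chars.lower raw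
  · rw [ppt_space_hit raw d ['u','s'] "us" (by decide) (by decide) h6]
    have e6 : PySem.Chars.startswith (PySem.Chars.lower raw) ['u','s',' '] = true := (sw _).mpr h6
    simp [pptLoop, pptPrefixes, e1, e2, e3, e4, e5, e6, PySem.List.slice_from raw (by norm_num : (0:Int) ≤ 3)]
  have e6 : PySem.Chars.startswith (PySem.Chars.lower raw) ['u','s',' '] = false :=
    Bool.eq_false_iff.mpr (fun h => h6 ((sw _).mp h))
  rw [ppt_space_fail raw d h5 h6]
  simp [pptLoop, pptPrefixes, e1, e2, e3, e4, e5, e6]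

-- ===== VERDICT (by name: the statement is the Claim_ definition above) =====
theorem parse_pronunciation_target_spec : Claim_equal_parse_pronunciation_target := by
  intro content d _
  unfold Spec_parse_pronunciation_target
  exact ppt_core (PySem.Chars.strip content.toList) d
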